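-- pv_equiv track=rewrite | github.com/krizzo101/master_root | libs/opsvi-docs/opsvi_docs/docRuleGen/rules_engine/transformers/markdown_to_rule.py | _generate_rule_content
-- ===== SOURCE A (Python) =====
-- from typing import Dict, List, Any, Optional
--
-- def _generate_rule_content(
--
--     rule_id: str,
--     rule_name: str,
--     title: str,
--     description: str,
--     sections: Dict[str, str],
--     concepts: List[Dict[str, Any]],
--     content: Dict[str, Any],
--     taxonomy: Optional[Dict[str, Any]],
-- ) -> str:
--     """Generate rule content in the standard format."""
--     # Start with rule header
--     rule_content = [
--         f"{rule_id}-{rule_name}: WHEN creating, editing, or accessing ANY file TO ensure consistency you MUST follow these guidelines"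
--     ]
--
--     # Add overview section
--     if "overview" in sections:
--         rule_content.append("\n## Overview\n")
--         rule_content.append(sections["overview"])
--     else:
--         rule_content.append("\n## Overview\n")
--         rule_content.append(description)
--
--     # Add context section
--     if "context" in sections:
--         rule_content.append("\n## Context\n")
--         rule_content.append(sections["context"])
--
--     # Add requirements section
--     if "requirements" in sections:
--         rule_content.append("\n## Requirements\n")
--         rule_content.append(sections["requirements"])
--
--     # Add examples section
--     if "examples" in sections:
--         rule_content.append("\n## Examples\n")
--         rule_content.append(sections["examples"])
--
--     # Add warnings section
--     if "warnings" in sections: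
--         rule_content.append("\n## Warnings\n")
--         rule_content.append(sections["warnings"])
--
--     # Add other sections
--     for section_name, section_content in sections.items():
--         if section_name not in [
--             "overview",
--             "context",
--             "requirements",
--             "examples",
--             "warnings",
--             "title",
--         ]:
--             rule_content.append(f"\n## {section_name.replace('_', ' ').title()}\n")
--             rule_content.append(section_content)
--
--     # Join all sections
--     return "\n".join(rule_content)
-- ===== SOURCE B (Python) =====
-- from typing import Dict, List, Any, Optional
--
-- _RANK = {"overview": 0, "context": 1, "requirements": 2, "examples": 3, "warnings": 4}
--
--
-- def _generate_rule_content(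
--     rule_id: str,
--     rule_name: str,
--     title: str,
--     description: str,
--     sections: Dict[str, str],
--     concepts: List[Dict[str, Any]],
--     content: Dict[str, Any],
--     taxonomy: Optional[Dict[str, Any]],
-- ) -> str:
--     """Rank every section, stable-sort once, emit all sections with one uniform loop."""
--     merged = dict(sections)
--     merged.setdefault("overview", description)
--     ordered = sorted(
--         [(k, v) for k, v in merged.items() if k != "title"],
--         key=lambda kv: _RANK.get(kv[0], 5),
--     )
--     parts = [
--         f"{rule_id}-{rule_name}: WHEN creating, editing, or accessing ANY file TO ensure consistency you MUST follow these guidelines"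
--     ]
--     for k, v in ordered:
--         parts.append(f"\n## {k.replace('_', ' ').title()}\n")
--         parts.append(v)
--     return "\n".join(parts)
-- ===== Notes on version B (the rewrite author's own statement) =====
-- stated objective: alternative
-- what changed: Replaces A's hard-coded five-branch if/else chain plus a trailing skip-list loop with a rank-and-stable-sort scheme: the overview fallback is merged into the dict up front, every remaining section gets a numeric rank (known sections 0-4, everything else 5), one stable sort puts them in output order, and a single uniform loop with one uniform heading rule (k.replace('_',' ').title()) emits them all.
import Mathlib
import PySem

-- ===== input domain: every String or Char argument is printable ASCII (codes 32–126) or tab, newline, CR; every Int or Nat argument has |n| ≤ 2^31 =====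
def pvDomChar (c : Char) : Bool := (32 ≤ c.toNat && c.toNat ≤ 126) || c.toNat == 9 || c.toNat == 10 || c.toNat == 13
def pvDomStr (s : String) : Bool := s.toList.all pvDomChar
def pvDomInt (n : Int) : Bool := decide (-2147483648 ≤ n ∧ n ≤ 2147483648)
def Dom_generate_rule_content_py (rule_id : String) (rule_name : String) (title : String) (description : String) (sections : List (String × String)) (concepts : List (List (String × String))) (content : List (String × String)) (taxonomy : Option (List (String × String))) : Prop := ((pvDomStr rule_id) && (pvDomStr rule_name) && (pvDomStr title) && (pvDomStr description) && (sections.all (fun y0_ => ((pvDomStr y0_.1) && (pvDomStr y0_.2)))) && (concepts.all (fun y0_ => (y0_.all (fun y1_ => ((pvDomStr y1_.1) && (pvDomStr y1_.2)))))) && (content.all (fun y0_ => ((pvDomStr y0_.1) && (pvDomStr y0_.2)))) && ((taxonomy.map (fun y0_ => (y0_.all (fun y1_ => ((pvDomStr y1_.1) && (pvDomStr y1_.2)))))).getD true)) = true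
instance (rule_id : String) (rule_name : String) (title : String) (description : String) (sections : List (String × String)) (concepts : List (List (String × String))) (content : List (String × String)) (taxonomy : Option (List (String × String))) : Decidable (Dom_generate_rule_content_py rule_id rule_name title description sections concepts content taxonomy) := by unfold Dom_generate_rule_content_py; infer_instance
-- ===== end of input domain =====

-- B replaces A's hard-coded branch chain by rank-all-sections + one stable sort + one uniform emission loop; same output, different organisation (objective: alternative).

-- shared library helper: hand port of Python str.title(); exact on the ASCII domain
-- (on ASCII the 'cased' characters are exactly the letters, so the word boundary test is isalpha)
def pyTitleChars : Bool → List Char → List Char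
  | _, [] => []
  | prev, c :: rest =>
    if PySem.Chars.isalpha c then
      (if prev then PySem.Chars.lowerChar c else PySem.Chars.upperChar c) :: pyTitleChars true rest
    else c :: pyTitleChars false rest

def pyTitle (s : String) : String := String.ofList (pyTitleChars false s.toList)

-- ===== PORT A =====
def generate_rule_content_py (rule_id : String) (rule_name : String) (title : String) (description : String) (sections : List (String × String)) (concepts : List (List (String × String))) (content : List (String × String)) (taxonomy : Option (List (String × String))) : String :=
  let d : PySem.Dict String String := PySem.Dict.ofList sections
  let rule_content : List String := [rule_id ++ "-" ++ rule_name ++ ": WHEN creating, editing, or accessing ANY file TO ensure consistency you MUST follow these guidelines"]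
  let rule_content :=
    if d.contains "overview" then rule_content ++ ["\n## Overview\n", (d.get? "overview").getD ""]
    else rule_content ++ ["\n## Overview\n", description]
  let rule_content :=
    if d.contains "context" then rule_content ++ ["\n## Context\n", (d.get? "context").getD ""]
    else rule_content
  let rule_content :=
    if d.contains "requirements" then rule_content ++ ["\n## Requirements\n", (d.get? "requirements").getD ""]
    else rule_content
  let rule_content :=
    if d.contains "examples" then rule_content ++ ["\n## Examples\n", (d.get? "examples").getD ""]
    else rule_content
  let rule_content :=
    if d.contains "warnings" then rule_content ++ ["\n## Warnings\n", (d.get? "warnings").getD ""]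
    else rule_content
  let rule_content := d.items.foldl (fun acc p =>
    if p.1 ∈ (["overview", "context", "requirements", "examples", "warnings", "title"] : List String) then acc
    else acc ++ ["\n## " ++ pyTitle (PySem.Str.replace p.1 "_" " ") ++ "\n", p.2]) rule_content
  PySem.Str.join "\n" rule_content

-- ===== PORT B =====
-- _RANK.get(k, 5)
def pvRank (k : String) : Int :=
  (PySem.Dict.ofList [("overview", (0 : Int)), ("context", 1), ("requirements", 2), ("examples", 3), ("warnings", 4)]).getD k 5

def generate_rule_content_py_alt (rule_id : String) (rule_name : String) (title : String) (description : String) (sections : List (String × String)) (concepts : List (List (String × String))) (content : List (String × String)) (taxonomy : Option (List (String × String))) : String :=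
  let merged := (PySem.Dict.ofList sections).setdefault "overview" description
  let ordered := PySem.List.sorted (merged.items.filter (fun p => decide (p.1 ≠ "title"))) (fun kv => pvRank kv.1) false
  let parts : List String :=
    (rule_id ++ "-" ++ rule_name ++ ": WHEN creating, editing, or accessing ANY file TO ensure consistency you MUST follow these guidelines")
    :: ordered.flatMap (fun p => ["\n## " ++ pyTitle (PySem.Str.replace p.1 "_" " ") ++ "\n", p.2])
  PySem.Str.join "\n" parts

-- ===== PRECONDITION & SPEC =====
def Spec_generate_rule_content_py (rule_id : String) (rule_name : String) (title : String) (description : String) (sections : List (String × String)) (concepts : List (List (String × String))) (content : List (String × String)) (taxonomy : Option (List (String × String))) (out : String) : Prop := out = generate_rule_content_py_alt rule_id rule_name title description sections concepts content taxonomy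
instance (rule_id : String) (rule_name : String) (title : String) (description : String) (sections : List (String × String)) (concepts : List (List (String × String))) (content : List (String × String)) (taxonomy : Option (List (String × String))) (out : String) : Decidable (Spec_generate_rule_content_py rule_id rule_name title description sections concepts content taxonomy out) := by unfold Spec_generate_rule_content_py; infer_instance

-- ===== CLAIM (what is proved, stated in full; the proofs are below) =====
def Claim_equal_generate_rule_content_py : Prop := ∀ (rule_id : String) (rule_name : String) (title : String) (description : String) (sections : List (String × String)) (concepts : List (List (String × String))) (content : List (String × String)) (taxonomy : Option (List (String × String))), Dom_generate_rule_content_py rule_id rule_name title description sections concepts content taxonomy → Spec_generate_rule_content_py rule_id rule_name title description sections concepts content taxonomy (generate_rule_content_py rule_id rule_name title description sections concepts content taxonomy)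

-- ===== LEMMAS AND PROOFS =====

def pvKnown : List (String × String) := [("context", "Context"), ("requirements", "Requirements"), ("examples", "Examples"), ("warnings", "Warnings")]
def pvSkip : List String := ["overview", "context", "requirements", "examples", "warnings", "title"]

-- the (heading, content) pairs both programs emit after the header
def pvPairs (d : PySem.Dict String String) (description : String) : List (String × String) :=
  ("\n## Overview\n", (d.get? "overview").getD description)
  :: (pvKnown.filter (fun p => d.contains p.1)).map (fun p => ("\n## " ++ p.2 ++ "\n", (d.get? p.1).getD ""))
  ++ (d.items.filter (fun p => decide (p.1 ∉ pvSkip))).map (fun p => ("\n## " ++ pyTitle (PySem.Str.replace p.1 "_" " ") ++ "\n", p.2))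

def pvRender (p : String × String) : String × String :=
  ("\n## " ++ pyTitle (PySem.Str.replace p.1 "_" " ") ++ "\n", p.2)

-- the trailing 'other sections' loop of A, as filter + flatMap
theorem pv_foldl_skip (g : String × String → List String) (l : List (String × String)) (acc : List String) :
    l.foldl (fun a p =>
        if p.1 ∈ (["overview", "context", "requirements", "examples", "warnings", "title"] : List String) then a
        else a ++ g p) acc
      = acc ++ (l.filter (fun p => decide (p.1 ∉ pvSkip))).flatMap g := by
  induction l generalizing acc with
  | nil => simp
  | cons x t ih =>
    rw [List.foldl_cons, List.filter_cons]
    by_cases h : x.1 ∈ (["overview", "context", "requirements", "examples", "warnings", "title"] : List String)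
    · have hd : decide (x.1 ∉ pvSkip) = false := by simp [pvSkip, h]
      rw [if_pos h, hd, ih]
      simp
    · have hd : decide (x.1 ∉ pvSkip) = true := by simp [pvSkip, h]
      rw [if_neg h, hd, ih]
      simp

theorem pv_A_eq (rule_id rule_name title description : String) (sections : List (String × String)) (concepts : List (List (String × String))) (content : List (String × String)) (taxonomy : Option (List (String × String))) :
    generate_rule_content_py rule_id rule_name title description sections concepts content taxonomy
      = PySem.Str.join "\n"
          ((rule_id ++ "-" ++ rule_name ++ ": WHEN creating, editing, or accessing ANY file TO ensure consistency you MUST follow these guidelines")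
            :: (pvPairs (PySem.Dict.ofList sections) description).flatMap (fun p => [p.1, p.2])) := by
  simp only [generate_rule_content_py]
  rw [pv_foldl_skip]
  rw [PySem.Dict.contains_eq_isSome_get? (PySem.Dict.ofList sections) "overview"]
  cases hov : (PySem.Dict.ofList sections).get? "overview" <;>
    cases hc : (PySem.Dict.ofList sections).contains "context" <;>
    cases hr : (PySem.Dict.ofList sections).contains "requirements" <;>
    cases he : (PySem.Dict.ofList sections).contains "examples" <;>
    cases hw : (PySem.Dict.ofList sections).contains "warnings" <;>
    simp [pvPairs, pvKnown, hov, hc, hr, he, hw, List.flatMap_map]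

theorem pvRank_eq (k : String) :
    pvRank k = if k = "overview" then 0 else if k = "context" then 1 else if k = "requirements" then 2
      else if k = "examples" then 3 else if k = "warnings" then 4 else 5 := by
  by_cases h1 : k = "overview"
  · subst h1; decide
  by_cases h2 : k = "context"
  · subst h2; decide
  by_cases h3 : k = "requirements"
  · subst h3; decide
  by_cases h4 : k = "examples"
  · subst h4; decide
  by_cases h5 : k = "warnings"
  · subst h5; decide
  have hof : PySem.Dict.ofList [("overview", (0 : Int)), ("context", 1), ("requirements", 2), ("examples", 3), ("warnings", 4)]
      = PySem.Dict.mk [("overview", (0 : Int)), ("context", 1), ("requirements", 2), ("examples", 3), ("warnings", 4)] := by rfl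
  have b1 : ("overview" == k) = false := by simpa using (Ne.symm h1)
  have b2 : ("context" == k) = false := by simpa using (Ne.symm h2)
  have b3 : ("requirements" == k) = false := by simpa using (Ne.symm h3)
  have b4 : ("examples" == k) = false := by simpa using (Ne.symm h4)
  have b5 : ("warnings" == k) = false := by simpa using (Ne.symm h5)
  rw [pvRank, hof, PySem.Dict.getD_eq_get?_getD]
  simp [PySem.Dict.get?_mk_cons, b1, b2, b3, b4, b5, h1, h2, h3, h4, h5, PySem.Dict.get?]


theorem pv_filter_key (l : List (String × String)) (k : String) (h : (l.map Prod.fst).Nodup) :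
    l.filter (fun p => decide (p.1 = k)) = ((PySem.Dict.mk l).get? k).elim [] (fun v => [(k, v)]) := by
  induction l with
  | nil => rfl
  | cons a t ih =>
    obtain ⟨a1, a2⟩ := a
    simp only [List.map_cons, List.nodup_cons] at h
    rw [List.filter_cons, PySem.Dict.get?_mk_cons]
    by_cases hk : a1 = k
    · subst hk
      have hnil : t.filter (fun p => decide (p.1 = a1)) = [] := by
        apply List.filter_eq_nil_iff.mpr
        intro p hp hc
        apply h.1
        rw [← (by simpa using hc : p.1 = a1)]
        exact List.mem_map_of_mem hp
      simp [hnil]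
    · have hbeq : (a1 == k) = false := by simpa using hk
      simp only [hbeq, if_false, hk, decide_false, Bool.false_eq_true, ih h.2]


theorem pv_insertBy_section {α : Type} (before : α → α → Bool) (x : α) (A B : List α)
    (hA : ∀ y ∈ A, before x y = false) (hB : ∀ y ∈ B, before x y = true) :
    PySem.List.insertBy before x (A ++ B) = A ++ x :: B := by
  induction A with
  | nil =>
    cases B with
    | nil => simp [PySem.List.insertBy]
    | cons b bs => simp [PySem.List.insertBy, hB b (by simp)]
  | cons a as ih =>
    simp only [List.cons_append, PySem.List.insertBy, hA a (by simp)]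
    simp only [Bool.false_eq_true, if_false, List.cons_append, List.cons.injEq, true_and]
    exact ih (fun y hy => hA y (by simp [hy]))


-- stable sort by a key whose values lie in the strictly increasing list rs
-- = the buckets l.filter (key = r), r ∈ rs, concatenated (each in input order)
theorem pv_sorted_buckets {α : Type} (key : α → Int) (rs : List Int) (hrs : rs.Pairwise (· < ·)) :
    ∀ (l : List α), (∀ x ∈ l, key x ∈ rs) →
    PySem.List.sorted l key false = rs.flatMap (fun r => l.filter (fun x => decide (key x = r))) := by
  intro l
  induction l using List.reverseRecOn with
  | nil => simp [PySem.List.sorted_eq_foldl_insertBy]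
  | append_singleton t x ih =>
    intro h
    have ht : ∀ y ∈ t, key y ∈ rs := fun y hy => h y (by simp [hy])
    have hx : key x ∈ rs := h x (by simp)
    rw [PySem.List.sorted_eq_foldl_insertBy, List.foldl_append, List.foldl_cons, List.foldl_nil,
      ← PySem.List.sorted_eq_foldl_insertBy, ih ht]
    obtain ⟨rs1, rs2, hsplit⟩ := List.append_of_mem hx
    subst hsplit
    have hpw := hrs
    rw [List.pairwise_append] at hpw
    obtain ⟨hp1, hp2, hcross⟩ := hpw
    rw [List.pairwise_cons] at hp2
    have hne1 : ∀ r ∈ rs1, r ≠ key x := fun r hr => ne_of_lt (hcross r hr (key x) (by simp))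
    have hne2 : ∀ r ∈ rs2, r ≠ key x := fun r hr => (ne_of_lt (hp2.1 r hr)).symm
    have hgrp : (rs1 ++ key x :: rs2).flatMap (fun r => t.filter (fun y => decide (key y = r)))
        = (rs1.flatMap (fun r => t.filter (fun y => decide (key y = r))) ++ t.filter (fun y => decide (key y = key x)))
          ++ rs2.flatMap (fun r => t.filter (fun y => decide (key y = r))) := by
      simp [List.flatMap_append]
    rw [hgrp, pv_insertBy_section _ x
        (rs1.flatMap (fun r => t.filter (fun y => decide (key y = r))) ++ t.filter (fun y => decide (key y = key x)))
        (rs2.flatMap (fun r => t.filter (fun y => decide (key y = r))))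
        ?hA ?hB]
    case hA =>
      intro y hy
      simp only [List.mem_append, List.mem_flatMap, List.mem_filter] at hy
      rcases hy with ⟨r, hr, _, hk⟩ | ⟨_, hk⟩
      · have h1 : key y = r := by simpa using hk
        have h2 := hcross r hr (key x) (by simp)
        simp; omega
      · have h1 : key y = key x := by simpa using hk
        simp; omega
    case hB =>
      intro y hy
      simp only [List.mem_flatMap, List.mem_filter] at hy
      obtain ⟨r, hr, _, hk⟩ := hy
      have h1 : key y = r := by simpa using hk
      have h2 := hp2.1 r hr
      simp; omega
    have e1 : rs1.flatMap (fun r => (t ++ [x]).filter (fun y => decide (key y = r)))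
        = rs1.flatMap (fun r => t.filter (fun y => decide (key y = r))) :=
      List.flatMap_congr (fun r hr => by
        have hf : (decide (key x = r)) = false := by simpa using (hne1 r hr).symm
        simp [List.filter_append, hf])
    have e2 : rs2.flatMap (fun r => (t ++ [x]).filter (fun y => decide (key y = r)))
        = rs2.flatMap (fun r => t.filter (fun y => decide (key y = r))) :=
      List.flatMap_congr (fun r hr => by
        have hf : (decide (key x = r)) = false := by simpa using (hne2 r hr).symm
        simp [List.filter_append, hf])
    rw [List.flatMap_append, List.flatMap_cons, e1, e2]
    simp [List.filter_append]


-- condition algebra for the buckets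
theorem pv_cond_known (r : Int) (k0 : String)
    (hr : (r, k0) ∈ ([(0, "overview"), (1, "context"), (2, "requirements"), (3, "examples"), (4, "warnings")] : List (Int × String)))
    (k : String) :
    (decide (pvRank k = r) && decide (¬ k = "title")) = decide (k = k0) := by
  rw [pvRank_eq]
  by_cases h1 : k = "overview" <;> by_cases h2 : k = "context" <;> by_cases h3 : k = "requirements" <;>
    by_cases h4 : k = "examples" <;> by_cases h5 : k = "warnings" <;>
    fin_cases hr <;> simp_all

theorem pv_cond_other (k : String) :
    (decide (pvRank k = 5) && decide (¬ k = "title")) = decide (k ∉ pvSkip) := by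
  rw [pvRank_eq]
  by_cases h1 : k = "overview" <;> by_cases h2 : k = "context" <;> by_cases h3 : k = "requirements" <;>
    by_cases h4 : k = "examples" <;> by_cases h5 : k = "warnings" <;> by_cases h6 : k = "title" <;>
    simp_all [pvSkip]

theorem pv_title_ov : pyTitle (PySem.Str.replace "overview" "_" " ") = "Overview" := by decide
theorem pv_title_ctx : pyTitle (PySem.Str.replace "context" "_" " ") = "Context" := by decide
theorem pv_title_req : pyTitle (PySem.Str.replace "requirements" "_" " ") = "Requirements" := by decide
theorem pv_title_ex : pyTitle (PySem.Str.replace "examples" "_" " ") = "Examples" := by decide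
theorem pv_title_warn : pyTitle (PySem.Str.replace "warnings" "_" " ") = "Warnings" := by decide

theorem pv_main (d m : PySem.Dict String String) (description : String)
    (hnd : m.keys.Nodup)
    (hov : m.get? "overview" = some ((d.get? "overview").getD description))
    (hc : m.get? "context" = d.get? "context")
    (hr : m.get? "requirements" = d.get? "requirements")
    (he : m.get? "examples" = d.get? "examples")
    (hw : m.get? "warnings" = d.get? "warnings")
    (hother : m.items.filter (fun p => decide (p.1 ∉ pvSkip)) = d.items.filter (fun p => decide (p.1 ∉ pvSkip))) :
    (PySem.List.sorted (m.items.filter (fun p => decide (¬ p.1 = "title"))) (fun kv => pvRank kv.1) false).map pvRender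
      = pvPairs d description := by
  have hmem : ∀ p ∈ m.items.filter (fun p => decide (¬ p.1 = "title")), pvRank p.1 ∈ ([0, 1, 2, 3, 4, 5] : List Int) := by
    intro p _
    rw [pvRank_eq]
    split_ifs <;> simp
  have hb := pv_sorted_buckets (fun (kv : String × String) => pvRank kv.1) [0, 1, 2, 3, 4, 5] (by decide)
    (m.items.filter (fun p => decide (¬ p.1 = "title"))) hmem
  rw [hb]
  simp only [List.flatMap_cons, List.flatMap_nil, List.append_nil, List.filter_filter]
  have hnd' : (m.items.map Prod.fst).Nodup := by simpa [PySem.Dict.keys] using hnd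
  have b0 : m.items.filter (fun a => decide (pvRank a.1 = 0) && decide (¬ a.1 = "title"))
      = ((m.get? "overview").elim [] (fun v => [("overview", v)])) := by
    rw [List.filter_congr (fun p _ => pv_cond_known 0 "overview" (by decide) p.1), pv_filter_key _ _ hnd']
  have b1 : m.items.filter (fun a => decide (pvRank a.1 = 1) && decide (¬ a.1 = "title"))
      = ((m.get? "context").elim [] (fun v => [("context", v)])) := by
    rw [List.filter_congr (fun p _ => pv_cond_known 1 "context" (by decide) p.1), pv_filter_key _ _ hnd']
  have b2 : m.items.filter (fun a => decide (pvRank a.1 = 2) && decide (¬ a.1 = "title"))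
      = ((m.get? "requirements").elim [] (fun v => [("requirements", v)])) := by
    rw [List.filter_congr (fun p _ => pv_cond_known 2 "requirements" (by decide) p.1), pv_filter_key _ _ hnd']
  have b3 : m.items.filter (fun a => decide (pvRank a.1 = 3) && decide (¬ a.1 = "title"))
      = ((m.get? "examples").elim [] (fun v => [("examples", v)])) := by
    rw [List.filter_congr (fun p _ => pv_cond_known 3 "examples" (by decide) p.1), pv_filter_key _ _ hnd']
  have b4 : m.items.filter (fun a => decide (pvRank a.1 = 4) && decide (¬ a.1 = "title"))
      = ((m.get? "warnings").elim [] (fun v => [("warnings", v)])) := by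
    rw [List.filter_congr (fun p _ => pv_cond_known 4 "warnings" (by decide) p.1), pv_filter_key _ _ hnd']
  have b5 : m.items.filter (fun a => decide (pvRank a.1 = 5) && decide (¬ a.1 = "title"))
      = d.items.filter (fun p => decide (p.1 ∉ pvSkip)) := by
    rw [List.filter_congr (fun p _ => pv_cond_other p.1), hother]
  rw [b0, b1, b2, b3, b4, b5, hov, hc, hr, he, hw]
  rw [pvPairs]
  simp only [PySem.Dict.contains_eq_isSome_get?]
  cases hgc : d.get? "context" <;> cases hgr : d.get? "requirements" <;>
    cases hge : d.get? "examples" <;> cases hgw : d.get? "warnings" <;>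
    simp [pvKnown, pvRender, hgc, hgr, hge, hgw, pv_title_ov, pv_title_ctx, pv_title_req, pv_title_ex, pv_title_warn]

theorem pv_ordered (description : String) (sections : List (String × String)) :
    (PySem.List.sorted
        (((PySem.Dict.ofList sections).setdefault "overview" description).items.filter (fun p => decide (¬ p.1 = "title")))
        (fun kv => pvRank kv.1) false).map pvRender
      = pvPairs (PySem.Dict.ofList sections) description := by
  by_cases hov : (PySem.Dict.ofList sections).contains "overview"
  · rw [PySem.Dict.setdefault_of_contains _ _ hov]
    have hsome : ((PySem.Dict.ofList sections).get? "overview").isSome := by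
      rw [← PySem.Dict.contains_eq_isSome_get?]; exact hov
    apply pv_main _ _ _ (PySem.Dict.nodup_keys_ofList sections) _ rfl rfl rfl rfl rfl
    cases hg : (PySem.Dict.ofList sections).get? "overview"
    · rw [hg] at hsome; simp at hsome
    · simp [hg]
  · have hov' : (PySem.Dict.ofList sections).contains "overview" = false := by simpa using hov
    rw [PySem.Dict.setdefault_of_not_contains _ _ hov']
    have hnone : (PySem.Dict.ofList sections).get? "overview" = none := by
      cases hg : (PySem.Dict.ofList sections).get? "overview"
      · rfl
      · rw [PySem.Dict.contains_eq_isSome_get?, hg] at hov'; simp at hov'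
    apply pv_main _ _ _ (PySem.Dict.nodup_keys_insert _ _ _ (PySem.Dict.nodup_keys_ofList sections))
    · rw [PySem.Dict.get?_insert_self, hnone]; rfl
    · exact PySem.Dict.get?_insert_of_ne _ _ (by decide)
    · exact PySem.Dict.get?_insert_of_ne _ _ (by decide)
    · exact PySem.Dict.get?_insert_of_ne _ _ (by decide)
    · exact PySem.Dict.get?_insert_of_ne _ _ (by decide)
    · rw [PySem.Dict.items_insert_of_not_contains _ _ hov', List.filter_append]
      simp [pvSkip]

theorem pv_B_eq (rule_id rule_name title description : String) (sections : List (String × String)) (concepts : List (List (String × String))) (content : List (String × String)) (taxonomy : Option (List (String × String))) :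
    generate_rule_content_py_alt rule_id rule_name title description sections concepts content taxonomy
      = PySem.Str.join "\n"
          ((rule_id ++ "-" ++ rule_name ++ ": WHEN creating, editing, or accessing ANY file TO ensure consistency you MUST follow these guidelines")
            :: (pvPairs (PySem.Dict.ofList sections) description).flatMap (fun p => [p.1, p.2])) := by
  simp only [generate_rule_content_py_alt]
  rw [← pv_ordered description sections]
  simp [pvRender, List.flatMap_map]

-- ===== VERDICT (by name: the statement is the Claim_ definition above) =====
theorem generate_rule_content_py_spec : Claim_equal_generate_rule_content_py := by
  intro rule_id rule_name title description sections concepts content taxonomy _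
  unfold Spec_generate_rule_content_py
  rw [pv_A_eq, pv_B_eq]
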